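-- pv_equiv track=rewrite | github.com/kiransiripurapu-deepgrid/kraken_soc | scripts/scripts/export_dronet_v3_manifest.py | parse_weight_files_for_layers
-- ===== SOURCE A (Python) =====
-- def parse_weight_files_for_layers(sequence: list[str], weight_files: list[str]) -> list[str | None]:
--     mapped: list[str | None] = []
--     weight_idx = 0
--     for layer in sequence:
--         if layer.startswith("layerMaxPool"):
--             mapped.append(None)
--             continue
--         if weight_idx >= len(weight_files):
--             raise RuntimeError("Weight file list shorter than weighted layer sequence")
--         mapped.append(weight_files[weight_idx])
--         weight_idx += 1
--     return mapped
-- ===== SOURCE B (Python) =====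
-- def parse_weight_files_for_layers(sequence: list[str], weight_files: list[str]) -> list[str | None]:
--     needed = sum(1 for layer in sequence if not layer.startswith("layerMaxPool"))
--     if needed > len(weight_files):
--         raise RuntimeError("Weight file list shorter than weighted layer sequence")
--     files = iter(weight_files)
--     return [None if layer.startswith("layerMaxPool") else next(files)
--             for layer in sequence]
-- ===== Notes on version B (the rewrite author's own statement) =====
-- stated objective: alternative
-- what changed: B validates up front by counting non-maxpool layers (raising the same RuntimeError if the count exceeds len(weight_files)) and then builds the result in a separate pass from an iterator, instead of A's single pass with an inline per-element index bound check and manual counter.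
import Mathlib
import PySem

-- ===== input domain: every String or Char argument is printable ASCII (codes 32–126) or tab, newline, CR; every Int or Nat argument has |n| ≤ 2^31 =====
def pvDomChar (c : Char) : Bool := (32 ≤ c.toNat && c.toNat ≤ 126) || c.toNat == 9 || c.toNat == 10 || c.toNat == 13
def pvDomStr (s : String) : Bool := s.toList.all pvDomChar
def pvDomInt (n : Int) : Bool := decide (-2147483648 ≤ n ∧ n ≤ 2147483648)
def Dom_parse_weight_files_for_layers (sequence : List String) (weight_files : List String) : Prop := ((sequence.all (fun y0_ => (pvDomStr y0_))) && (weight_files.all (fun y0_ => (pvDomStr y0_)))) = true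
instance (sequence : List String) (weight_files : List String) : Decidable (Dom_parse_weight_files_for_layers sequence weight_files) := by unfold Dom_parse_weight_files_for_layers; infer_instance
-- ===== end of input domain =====

-- B separates validation (count weighted layers) from construction (iterator pass); proved return-value-equal to A where A returns (Pre_); alternative decomposition, not faster.
-- ===== PORT A =====
-- single pass: inline bound check against weight_idx; 'none' result = Python RuntimeError
def pwfflA_go (weight_files : List String) : List String → Nat → Option (List (Option String))
  | [], _ => some []
  | layer :: rest, weight_idx =>
    if PySem.Str.startswith layer "layerMaxPool" then
      (pwfflA_go weight_files rest weight_idx).map (fun m => none :: m)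
    else if weight_files.length ≤ weight_idx then none
    else
      match weight_files[weight_idx]? with
      | none => none
      | some w => (pwfflA_go weight_files rest (weight_idx + 1)).map (fun m => some w :: m)

def parse_weight_files_for_layers (sequence : List String) (weight_files : List String) : List (Option String) :=
  (pwfflA_go weight_files sequence 0).getD []

-- ===== PORT B =====
-- second pass of Source B: consume weight_files like the iterator; [] in the inner match is the (unreachable under the guard) StopIteration
def pwfflB_build : List String → List String → List (Option String)
  | [], _ => []
  | layer :: rest, files =>
    if PySem.Str.startswith layer "layerMaxPool" then none :: pwfflB_build rest files
    else
      match files with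
      | [] => []
      | w :: ws => some w :: pwfflB_build rest ws

def parse_weight_files_for_layers_alt (sequence : List String) (weight_files : List String) : List (Option String) :=
  let needed := sequence.countP (fun layer => !PySem.Str.startswith layer "layerMaxPool")
  if weight_files.length < needed then [] else pwfflB_build sequence weight_files

-- ===== PRECONDITION & SPEC =====
-- Pre_ excludes exactly the inputs where A raises RuntimeError: more weighted (non-maxpool) layers than weight files.
def Pre_parse_weight_files_for_layers (sequence : List String) (weight_files : List String) : Prop :=
  sequence.countP (fun layer => !PySem.Str.startswith layer "layerMaxPool") ≤ weight_files.length
instance (sequence : List String) (weight_files : List String) : Decidable (Pre_parse_weight_files_for_layers sequence weight_files) := by unfold Pre_parse_weight_files_for_layers; infer_instance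

def pvWitness_parse_weight_files_for_layers : List String × List String := (["layerMaxPool2", "layerConv1"], ["w0"])

def Spec_parse_weight_files_for_layers (sequence : List String) (weight_files : List String) (out : List (Option String)) : Prop := out = parse_weight_files_for_layers_alt sequence weight_files
instance (sequence : List String) (weight_files : List String) (out : List (Option String)) : Decidable (Spec_parse_weight_files_for_layers sequence weight_files out) := by unfold Spec_parse_weight_files_for_layers; infer_instance

-- ===== CLAIM (what is proved, stated in full; the proofs are below) =====
def Claim_equal_parse_weight_files_for_layers : Prop := ∀ (sequence : List String) (weight_files : List String), Dom_parse_weight_files_for_layers sequence weight_files → Pre_parse_weight_files_for_layers sequence weight_files → Spec_parse_weight_files_for_layers sequence weight_files (parse_weight_files_for_layers sequence weight_files)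

-- ===== LEMMAS AND PROOFS =====
-- loop invariant: with enough weight files left, A's indexed loop equals B's build on the remaining suffix
theorem pwfflA_go_eq (weight_files : List String) (sequence : List String) (i : Nat)
    (h : i + sequence.countP (fun layer => !PySem.Str.startswith layer "layerMaxPool") ≤ weight_files.length) :
    pwfflA_go weight_files sequence i = some (pwfflB_build sequence (weight_files.drop i)) := by
  induction sequence generalizing i with
  | nil => simp only [pwfflA_go, pwfflB_build]
  | cons layer rest ih =>
    rw [List.countP_cons] at h
    cases hs : PySem.Str.startswith layer "layerMaxPool" with
    | true =>
      simp only [hs, Bool.not_true, if_false, Nat.add_zero, Bool.false_eq_true] at h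
      simp only [pwfflA_go, pwfflB_build, hs, if_true, ih i h, Option.map_some]
    | false =>
      simp only [hs, Bool.not_false, if_true, Bool.false_eq_true, if_false] at h
      have hlt : i < weight_files.length := by omega
      have h' : (i + 1) + rest.countP (fun layer => !PySem.Str.startswith layer "layerMaxPool")
          ≤ weight_files.length := by omega
      have hdrop : weight_files.drop i = weight_files[i] :: weight_files.drop (i + 1) :=
        List.drop_eq_getElem_cons hlt
      simp only [pwfflA_go, pwfflB_build, hs, Bool.false_eq_true, if_false,
        Nat.not_le.mpr hlt, List.getElem?_eq_getElem hlt, ih (i + 1) h', Option.map_some, hdrop]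

-- ===== VERDICT (by name: the statement is the Claim_ definition above) =====
theorem parse_weight_files_for_layers_spec : Claim_equal_parse_weight_files_for_layers := by
  intro sequence weight_files _ hpre
  unfold Spec_parse_weight_files_for_layers parse_weight_files_for_layers parse_weight_files_for_layers_alt
  unfold Pre_parse_weight_files_for_layers at hpre
  rw [pwfflA_go_eq weight_files sequence 0 (by omega)]
  simp only [List.drop_zero, Option.getD_some, Nat.not_lt.mpr hpre, if_false]
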